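-- pv_equiv track=rewrite | github.com/thebtype/polymarket | scripts/evaluate_day.py | build_market_groups
-- ===== SOURCE A (Python) =====
-- from collections import Counter, defaultdict
--
-- def build_market_groups(rows: list[dict]) -> dict[str, list[dict]]:
--     grouped: dict[str, list[dict]] = defaultdict(list)
--     for row in rows:
--         slug = row.get("slug")
--         if slug:
--             grouped[slug].append(row)
--     for slug in grouped:
--         grouped[slug].sort(key=lambda row: row.get("captured_at") or "")
--     return grouped
-- ===== SOURCE B (Python) =====
-- from collections import defaultdict
--
--
-- def build_market_groups(rows: list[dict]) -> dict[str, list[dict]]: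
--     # Fix key order first (first occurrence of each truthy slug), then one
--     # global stable sort by captured_at followed by a single grouping pass,
--     # instead of per-group sorts.
--     grouped = defaultdict(list, {s: [] for r in rows if (s := r.get("slug"))})
--     for row in sorted(rows, key=lambda r: r.get("captured_at") or ""):
--         s = row.get("slug")
--         if s:
--             grouped[s].append(row)
--     return grouped
-- ===== Notes on version B (the rewrite author's own statement) =====
-- stated objective: alternative
-- what changed: B replaces A's per-group in-place sorts with a single global stable sort by captured_at followed by one grouping pass (key order pre-established by a first-occurrence pass), relying on stable-sort/filter commutation.
import Mathlib
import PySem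

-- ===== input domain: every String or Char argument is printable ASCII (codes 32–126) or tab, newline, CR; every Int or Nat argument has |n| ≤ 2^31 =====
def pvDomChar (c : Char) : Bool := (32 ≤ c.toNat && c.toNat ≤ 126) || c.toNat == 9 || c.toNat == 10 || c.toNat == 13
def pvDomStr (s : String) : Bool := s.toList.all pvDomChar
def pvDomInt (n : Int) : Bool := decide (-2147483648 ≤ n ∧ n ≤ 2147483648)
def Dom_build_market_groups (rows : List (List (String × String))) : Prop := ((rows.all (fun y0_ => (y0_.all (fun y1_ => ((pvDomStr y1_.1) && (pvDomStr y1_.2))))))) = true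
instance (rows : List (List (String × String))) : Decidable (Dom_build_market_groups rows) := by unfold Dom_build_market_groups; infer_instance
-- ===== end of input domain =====

-- B builds the same groups with one global stable sort plus a single grouping pass instead of A's per-group sorts (objective: alternative decomposition, same cost).

-- row.get(k) on the row dict (association list, first match)
def pvGet (row : List (String × String)) (k : String) : Option String :=
  (PySem.Dict.mk row).get? k

-- row.get("captured_at") or ""   (both None and "" yield "")
def pvCap (row : List (String × String)) : String :=
  match pvGet row "captured_at" with
  | some s => s
  | none => ""

-- ===== PORT A =====
def build_market_groups (rows : List (List (String × String))) : List (String × List (List (String × String))) :=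
  let grouped : PySem.Dict String (List (List (String × String))) :=
    rows.foldl (fun d row =>
      match pvGet row "slug" with
      | some slug => if slug ≠ "" then d.modify slug [] (fun v => v ++ [row]) else d
      | none => d) PySem.Dict.empty
  let grouped2 :=
    grouped.keys.foldl (fun d slug =>
      d.modify slug [] (fun v => PySem.List.sorted v pvCap false)) grouped
  grouped2.items

-- ===== PORT B =====
def build_market_groups_alt (rows : List (List (String × String))) : List (String × List (List (String × String))) :=
  -- {s: [] for r in rows if (s := r.get("slug"))}
  let init : PySem.Dict String (List (List (String × String))) :=
    rows.foldl (fun d row =>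
      match pvGet row "slug" with
      | some s => if s ≠ "" then d.insert s [] else d
      | none => d) PySem.Dict.empty
  -- for row in sorted(rows, key=…): append to its slug's group
  let grouped :=
    (PySem.List.sorted rows pvCap false).foldl (fun d row =>
      match pvGet row "slug" with
      | some s => if s ≠ "" then d.modify s [] (fun v => v ++ [row]) else d
      | none => d) init
  grouped.items

-- ===== PRECONDITION & SPEC =====
def Spec_build_market_groups (rows : List (List (String × String))) (out : List (String × List (List (String × String)))) : Prop := out = build_market_groups_alt rows
instance (rows : List (List (String × String))) (out : List (String × List (List (String × String)))) : Decidable (Spec_build_market_groups rows out) := by unfold Spec_build_market_groups; infer_instance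

-- ===== CLAIM (what is proved, stated in full; the proofs are below) =====
def Claim_equal_build_market_groups : Prop := ∀ (rows : List (List (String × String))), Dom_build_market_groups rows → Spec_build_market_groups rows (build_market_groups rows)

-- ===== LEMMAS AND PROOFS =====

-- the slug A's and B's guards test (getD "" is falsy exactly when the guard fails)
def pvSlug (row : List (String × String)) : String := (pvGet row "slug").getD ""

-- the grouping step shared by A's first loop and B's second loop, in guard form
lemma pv_stepA_eq :
    (fun (d : PySem.Dict String (List (List (String × String)))) row =>
      match pvGet row "slug" with
      | some slug => if slug ≠ "" then d.modify slug [] (fun v => v ++ [row]) else d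
      | none => d)
    = fun d row => if pvSlug row ≠ "" then d.modify (pvSlug row) [] (fun v => v ++ [row]) else d := by
  funext d row
  unfold pvSlug
  cases h : pvGet row "slug" <;> simp

lemma pv_stepInit_eq :
    (fun (d : PySem.Dict String (List (List (String × String)))) row =>
      match pvGet row "slug" with
      | some s => if s ≠ "" then d.insert s [] else d
      | none => d)
    = fun d row => if pvSlug row ≠ "" then d.insert (pvSlug row) [] else d := by
  funext d row
  unfold pvSlug
  cases h : pvGet row "slug" <;> simp

-- insertBy on a cons, both branches
lemma pv_insertBy_cons_pos {α : Type} (before : α → α → Bool) (x y : α) (ys : List α)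
    (h : before x y = true) :
    PySem.List.insertBy before x (y :: ys) = x :: y :: ys := by
  simp [PySem.List.insertBy, h]

lemma pv_insertBy_cons_neg {α : Type} (before : α → α → Bool) (x y : α) (ys : List α)
    (h : before x y = false) :
    PySem.List.insertBy before x (y :: ys) = y :: PySem.List.insertBy before x ys := by
  simp [PySem.List.insertBy, h]

-- insertBy goes to the front when it precedes every element
lemma pv_insertBy_cons {α : Type} (before : α → α → Bool) (x : α) (l : List α)
    (h : ∀ y ∈ l, before x y = true) :
    PySem.List.insertBy before x l = x :: l := by
  cases l with
  | nil => rfl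
  | cons y ys => exact pv_insertBy_cons_pos before x y ys (h y (by simp))

-- filter commutes with insertBy into a sorted accumulator
lemma pv_filter_insertBy {α κ : Type} [LinearOrder κ] (key : α → κ) (p : α → Bool) (x : α)
    (l : List α) (h : l.Pairwise (fun a b => key a ≤ key b)) :
    (PySem.List.insertBy (fun a b => decide (key a < key b)) x l).filter p
      = if p x then PySem.List.insertBy (fun a b => decide (key a < key b)) x (l.filter p)
        else l.filter p := by
  induction l with
  | nil => cases hpx : p x <;> simp [PySem.List.insertBy, hpx]
  | cons y ys ih =>
    rcases List.pairwise_cons.mp h with ⟨hy, hys⟩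
    by_cases hxy : key x < key y
    · rw [pv_insertBy_cons_pos _ _ _ _ (by simpa using hxy)]
      have hall : ∀ z ∈ (y :: ys).filter p, decide (key x < key z) = true := by
        intro z hz
        have hz' := List.mem_of_mem_filter hz
        rcases List.mem_cons.mp hz' with rfl | hz'
        · simpa using hxy
        · exact decide_eq_true (lt_of_lt_of_le hxy (hy z hz'))
      cases hpx : p x
      · simp [hpx]
      · rw [if_pos rfl, pv_insertBy_cons _ _ _ hall]
        simp [hpx]
    · rw [pv_insertBy_cons_neg _ _ _ _ (by simpa using hxy)]
      cases hpy : p y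
      · rw [List.filter_cons_of_neg (by simp [hpy]), List.filter_cons_of_neg (by simp [hpy]),
          ih hys]
      · rw [List.filter_cons_of_pos (by simp [hpy]), List.filter_cons_of_pos (by simp [hpy]),
          ih hys]
        cases hpx : p x
        · simp
        · rw [if_pos rfl, if_pos rfl,
            pv_insertBy_cons_neg _ _ _ _ (by simpa using hxy)]

-- sorted over an appended element is an insertBy into the sorted prefix
lemma pv_sorted_append_singleton {α κ : Type} [LinearOrder κ] (key : α → κ) (xs : List α)
    (x : α) :
    PySem.List.sorted (xs ++ [x]) key false
      = PySem.List.insertBy (fun a b => decide (key a < key b)) x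
          (PySem.List.sorted xs key false) := by
  rw [PySem.List.sorted_eq_foldl_insertBy (xs ++ [x]) key, List.foldl_append, List.foldl_cons,
    List.foldl_nil, ← PySem.List.sorted_eq_foldl_insertBy xs key]

-- key lemma: filtering a stably sorted list = stably sorting the filtered list
lemma pv_filter_sorted {α κ : Type} [LinearOrder κ] (key : α → κ) (p : α → Bool) (xs : List α) :
    (PySem.List.sorted xs key false).filter p = PySem.List.sorted (xs.filter p) key false := by
  induction xs using List.reverseRecOn with
  | nil => rfl
  | append_singleton xs x ih =>
    rw [pv_sorted_append_singleton,
      pv_filter_insertBy key p x _ (PySem.List.sorted_pairwise xs key), ih, List.filter_append]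
    cases hpx : p x
    · simp [hpx]
    · have hx : List.filter p [x] = [x] := by simp [hpx]
      rw [hx, pv_sorted_append_singleton, if_pos rfl]

-- an insert-[] loop keeps every group empty
lemma pv_getD_init (l : List (List (String × String)))
    (d : PySem.Dict String (List (List (String × String)))) (c : String)
    (hd : d.getD c [] = []) :
    (l.foldl (fun d row => d.insert (pvSlug row) []) d).getD c [] = [] := by
  induction l generalizing d with
  | nil => simpa using hd
  | cons r l ih =>
    rw [List.foldl_cons]
    apply ih
    rw [PySem.Dict.getD_insert]
    split <;> simp [hd]

-- one modify per distinct key: the second loop of A sorts each group exactly once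
lemma pv_getD_sortloop (ks : List String)
    (d : PySem.Dict String (List (List (String × String)))) (c : String) (hnd : ks.Nodup) :
    (ks.foldl (fun d slug => d.modify slug [] (fun v => PySem.List.sorted v pvCap false)) d).getD c []
      = if c ∈ ks then PySem.List.sorted (d.getD c []) pvCap false else d.getD c [] := by
  revert hnd
  induction ks generalizing d with
  | nil => intro _; simp
  | cons k ks ih =>
    intro hnd
    rcases List.nodup_cons.mp hnd with ⟨hk, hnd'⟩
    rw [List.foldl_cons, ih _ hnd', PySem.Dict.getD_modify]
    by_cases hck : c = k
    · subst hck
      simp [hk]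
    · simp [hck, List.mem_cons]

-- grouping fold, pair form: value at c is the subsequence of rows with slug c
lemma pv_getD_group (l : List (List (String × String)))
    (d : PySem.Dict String (List (List (String × String)))) (c : String) :
    (l.foldl (fun d row => d.modify (pvSlug row) [] (fun v => v ++ [row])) d).getD c []
      = d.getD c [] ++ l.filter (fun row => pvSlug row == c) := by
  have h1 : l.foldl (fun d row => d.modify (pvSlug row) [] (fun v => v ++ [row])) d
      = (l.map (fun row => (pvSlug row, row))).foldl
          (fun d p => d.modify p.1 [] (fun v => v ++ [p.2])) d := by
    rw [List.foldl_map]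
  rw [h1, PySem.Dict.getD_foldl_modify_append, List.filter_map]
  simp [Function.comp_def, List.map_map]

-- Set.update by elements already present is the identity
lemma pv_set_update_self {s xs : List String} (h : ∀ x ∈ xs, x ∈ s) :
    PySem.Set.update s xs = s := by
  rw [PySem.Set.update_eq_append_filter]
  have hnil : (PySem.Set.ofList xs).filter (fun y => !(PySem.Set.contains s y)) = [] := by
    apply List.filter_eq_nil_iff.mpr
    intro y hy
    have hys : y ∈ s := h y ((PySem.Set.mem_ofList xs y).mp hy)
    simpa [PySem.Set.contains_iff] using hys
  rw [hnil, List.append_nil]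

theorem build_market_groups_spec_aux (rows : List (List (String × String))) :
    build_market_groups rows = build_market_groups_alt rows := by
  unfold build_market_groups build_market_groups_alt
  rw [pv_stepA_eq, pv_stepInit_eq]
  simp only [PySem.List.foldl_ite_eq_foldl_filter (fun row => pvSlug row ≠ "")]
  set p : List (String × String) → Bool := fun row => decide (pvSlug row ≠ "") with hp
  set filt := rows.filter p with hfilt
  -- B's second pass runs over the sorted rows filtered = sorted filtered rows
  have hsortfilt : (PySem.List.sorted rows pvCap false).filter p
      = PySem.List.sorted filt pvCap false := pv_filter_sorted pvCap p rows
  -- A's first dict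
  set gA := filt.foldl (fun d row => d.modify (pvSlug row) [] (fun v => v ++ [row]))
      (PySem.Dict.empty : PySem.Dict String (List (List (String × String)))) with hgA
  -- keys of A's first dict
  have hkeysA : gA.keys = PySem.Set.ofList (filt.map pvSlug) := by
    rw [hgA, PySem.Dict.keys_foldl_modify_key filt pvSlug [] (fun _ row => (fun v => v ++ [row]))]
    rfl
  have hndA : gA.keys.Nodup := by
    rw [hkeysA]; exact PySem.Set.nodup_ofList _
  -- B's init dict
  set gI := filt.foldl (fun d row => d.insert (pvSlug row) [])
      (PySem.Dict.empty : PySem.Dict String (List (List (String × String)))) with hgI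
  have hkeysI : gI.keys = PySem.Set.ofList (filt.map pvSlug) := by
    rw [hgI, PySem.Dict.keys_foldl_insert_key filt pvSlug (fun _ _ => [])]
    rfl
  have hgetI : ∀ c, gI.getD c [] = [] := by
    intro c
    rw [hgI]
    exact pv_getD_init filt PySem.Dict.empty c (by simp)
  -- B's final dict
  set gB := ((PySem.List.sorted rows pvCap false).filter p).foldl
      (fun d row => d.modify (pvSlug row) [] (fun v => v ++ [row])) gI with hgB
  have hkeysB : gB.keys = PySem.Set.ofList (filt.map pvSlug) := by
    rw [hgB, PySem.Dict.keys_foldl_modify_key _ pvSlug [] (fun _ row => (fun v => v ++ [row])),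
      hkeysI, hsortfilt]
    apply pv_set_update_self
    intro x hx
    rw [PySem.Set.mem_ofList]
    rcases List.mem_map.mp hx with ⟨r, hr, rfl⟩
    exact List.mem_map.mpr ⟨r, ((PySem.List.mem_sorted filt pvCap false r).mp hr), rfl⟩
  have hndB : gB.keys.Nodup := by rw [hkeysB]; exact PySem.Set.nodup_ofList _
  -- A's final dict
  set gA2 := gA.keys.foldl
      (fun d slug => d.modify slug [] (fun v => PySem.List.sorted v pvCap false)) gA with hgA2
  have hkeysA2 : gA2.keys = gA.keys := by
    have h := PySem.Dict.keys_foldl_modify_key gA.keys (fun (s : String) => s)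
      ([] : List (List (String × String)))
      (fun _ _ => (fun v => PySem.List.sorted v pvCap false)) gA
    simp only [List.map_id'] at h
    rw [hgA2, h]
    exact pv_set_update_self (fun x hx => hx)
  have hndA2 : gA2.keys.Nodup := by rw [hkeysA2]; exact hndA
  -- the two value maps agree on every key
  have hval : ∀ c, gA2.getD c [] = gB.getD c [] := by
    intro c
    have hA : gA.getD c [] = filt.filter (fun row => pvSlug row == c) := by
      rw [hgA, pv_getD_group]
      simp
    have hB : gB.getD c []
        = PySem.List.sorted (filt.filter (fun row => pvSlug row == c)) pvCap false := by
      rw [hgB, hsortfilt, pv_getD_group, hgetI, List.nil_append,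
        pv_filter_sorted pvCap (fun row => pvSlug row == c) filt]
    rw [hgA2, pv_getD_sortloop gA.keys gA c hndA, hA, hB]
    by_cases hc : c ∈ gA.keys
    · rw [if_pos hc]
    · rw [if_neg hc]
      have hnilc : filt.filter (fun row => pvSlug row == c) = [] := by
        apply List.filter_eq_nil_iff.mpr
        intro r hr hrc
        apply hc
        rw [hkeysA, PySem.Set.mem_ofList]
        exact List.mem_map.mpr ⟨r, hr, by simpa using hrc⟩
      rw [hnilc]
      rfl
  -- items agree: same (nodup) key lists, same values
  rw [PySem.Dict.items_eq_map_keys gA2 hndA2 [], PySem.Dict.items_eq_map_keys gB hndB [],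
    hkeysA2, hkeysA, hkeysB]
  exact List.map_congr_left (fun k _ => by rw [hval k])

-- ===== VERDICT (by name: the statement is the Claim_ definition above) =====
theorem build_market_groups_spec : Claim_equal_build_market_groups := by
  intro rows _
  unfold Spec_build_market_groups
  exact build_market_groups_spec_aux rows
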